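-- pv_equiv track=rewrite | github.com/ikokkari/PythonProblems | labs109.py | costas_array
-- ===== SOURCE A (Python) =====
-- def costas_array(rows):
--     n, dvs, placed = len(rows), set(), dict()
--     to_fill = [row for (row, col) in enumerate(rows) if col is None]
--     still_free = [True for _ in range(n)]
--
--     def place_rook(row, col, undo_stack=None):
--         for prev_row in placed:
--             prev_col = placed[prev_row]
--             dx, dy = row - prev_row, col - prev_col
--             if (dx, dy) in dvs or (-dx, -dy) in dvs:
--                 return False
--             dvs.add((dx, dy))
--             if undo_stack is not None:
--                 undo_stack.append((dx, dy))
--         placed[row] = col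
--         still_free[col] = False
--         return True
--
--     for (row, col) in enumerate(rows):
--         if col is not None:
--             if not place_rook(row, col):
--                 return False
--
--     def fill_remaining():
--         if len(to_fill) == 0:
--             return True
--         row = to_fill.pop()
--         undo_stack = []
--         for col in range(n):
--             if still_free[col]:
--                 if place_rook(row, col, undo_stack):
--                     if fill_remaining():
--                         return True
--                     still_free[col] = True
--                     del placed[row]
--                 while len(undo_stack) > 0:
--                     dvs.remove(undo_stack.pop())
--         to_fill.append(row)
--         return False
--
--     return fill_remaining()
-- ===== SOURCE B (Python) =====
-- # Same backtracking search, but stateless: placed points kept in an immutable list and the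
-- # free-column table copied per branch, with each tentative placement validated by
-- # recomputing canonical difference vectors from scratch at that node -- no shared dvs set
-- # and no undo stack to roll back.
-- def costas_array(rows):
--     n = len(rows)
--
--     def canon(dx, dy):
--         # fixed sign representative of the pair {(dx, dy), (-dx, -dy)}
--         if dx > 0 or (dx == 0 and dy > 0):
--             return (dx, dy)
--         return (-dx, -dy)
--
--     def ok(points, row, col):
--         # vectors already used among the placed points, recomputed for this node
--         used = set()
--         done = []
--         for p in points:
--             for q in done:
--                 used.add(canon(p[0] - q[0], p[1] - q[1]))
--             done.append(p)
--         # vectors the tentative rook (row, col) would add must be new and mutually distinct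
--         fresh = set()
--         for (pr, pc) in points:
--             v = canon(row - pr, col - pc)
--             if v in used or v in fresh:
--                 return False
--             fresh.add(v)
--         return True
--
--     free = [True for _ in range(n)]
--     placed = []
--     for row, col in enumerate(rows):
--         if col is not None:
--             if not ok(placed, row, col):
--                 return False
--             placed.append((row, col))
--             free[col] = False
--
--     # pending rows, processed last-to-first (a stack, like A's to_fill.pop())
--     todo = [row for row, col in enumerate(rows) if col is None][::-1]
--
--     def solve(todo, placed, free):
--         if not todo:
--             return True
--         row, rest = todo[0], todo[1:]
--         for col in range(n):
--             if free[col] and ok(placed, row, col):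
--                 free2 = list(free)
--                 free2[col] = False
--                 if solve(rest, placed + [(row, col)], free2):
--                     return True
--         return False
--
--     return solve(todo, placed, free)
-- ===== Notes on version B (the rewrite author's own statement) =====
-- stated objective: simpler
-- what changed: Replaces A's shared mutable search state (persistent dvs set with undo stacks, rook dict mutated and rolled back, in-place free-table flips) by a pure backtracking recursion over an immutable placed-points list and a per-branch copy of the free-column table, validating each tentative rook by recomputing sign-canonicalized difference vectors from scratch at that node, so failure needs no rollback at all.
import Mathlib
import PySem

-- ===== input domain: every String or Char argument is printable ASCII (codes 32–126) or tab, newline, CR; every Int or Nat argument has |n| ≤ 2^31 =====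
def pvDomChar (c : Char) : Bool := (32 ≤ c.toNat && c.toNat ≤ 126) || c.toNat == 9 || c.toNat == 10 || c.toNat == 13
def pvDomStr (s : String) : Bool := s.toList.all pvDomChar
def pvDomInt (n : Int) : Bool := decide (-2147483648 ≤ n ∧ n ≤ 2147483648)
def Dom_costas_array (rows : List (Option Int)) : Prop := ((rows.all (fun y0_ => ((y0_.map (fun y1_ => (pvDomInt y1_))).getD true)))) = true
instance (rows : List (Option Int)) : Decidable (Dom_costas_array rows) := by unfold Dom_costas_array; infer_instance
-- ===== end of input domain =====

-- B re-implements the same backtracking completion check without A's shared mutable state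
-- (persistent dvs set + undo stacks): placements are validated by recomputing canonical
-- difference vectors from scratch per node over an immutable placed list and free-column set.
-- A mutates nothing observable by the caller; the equivalence is about the return value.

-- ===== PORT A =====

-- Python set.remove; in A the removed element is always present, so the default is never used
def pvSetRemove (s : PySem.Set (Int × Int)) (v : Int × Int) : PySem.Set (Int × Int) :=
  (PySem.Set.remove? s v).getD s

-- the 'for prev_row in placed' loop of place_rook (keys+lookup iterated as the items list);
-- returns (result, dvs, undo_stack)
def pvPlaceLoop (row col : Int) : List (Int × Int) → PySem.Set (Int × Int) →
    Option (List (Int × Int)) → Bool × PySem.Set (Int × Int) × Option (List (Int × Int))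
  | [], dvs, undo => (true, dvs, undo)
  | (pr, pc) :: rest, dvs, undo =>
    let dx := row - pr
    let dy := col - pc
    if (dx, dy) ∈ dvs ∨ (-dx, -dy) ∈ dvs then (false, dvs, undo)
    else pvPlaceLoop row col rest (PySem.Set.add dvs (dx, dy))
      (undo.map (fun u => u ++ [(dx, dy)]))

-- place_rook(row, col, undo_stack)
def pvPlaceRook (row col : Int) (dvs : PySem.Set (Int × Int)) (placed : PySem.Dict Int Int)
    (sf : List Bool) (undo : Option (List (Int × Int))) :
    Bool × PySem.Set (Int × Int) × PySem.Dict Int Int × List Bool × Option (List (Int × Int)) :=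
  match pvPlaceLoop row col placed.items dvs undo with
  | (true, dvs', undo') =>
    (true, dvs', placed.insert row col, PySem.List.pySetD sf col false, undo')
  | (false, dvs', undo') => (false, dvs', placed, sf, undo')

-- the fixed-rook loop 'for (row, col) in enumerate(rows)'; none = 'return False'
def pvInitLoop : List (Int × Option Int) →
    PySem.Set (Int × Int) × PySem.Dict Int Int × List Bool →
    Option (PySem.Set (Int × Int) × PySem.Dict Int Int × List Bool)
  | [], st => some st
  | (row, ocol) :: rest, (dvs, placed, sf) =>
    match ocol with
    | none => pvInitLoop rest (dvs, placed, sf)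
    | some col =>
      match pvPlaceRook row col dvs placed sf none with
      | (true, dvs', placed', sf', _) => pvInitLoop rest (dvs', placed', sf')
      | (false, _, _, _, _) => none

-- 'while len(undo_stack) > 0: dvs.remove(undo_stack.pop())' — pops from the end
def pvDrain (undo : List (Int × Int)) (dvs : PySem.Set (Int × Int)) : PySem.Set (Int × Int) :=
  undo.reverse.foldl (fun s v => pvSetRemove s v) dvs

-- fill_remaining(), with the mutable state threaded explicitly.  to_fill.pop()/append(row)
-- restore the shared list exactly, so the caller keeps its own copy of the remaining rows;
-- undo_stack is empty at the start of each loop iteration (the while loop drains it).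
mutual
def pvFill (n : Int) (toFill : List Int) (dvs : PySem.Set (Int × Int))
    (placed : PySem.Dict Int Int) (sf : List Bool) :
    Bool × PySem.Set (Int × Int) × PySem.Dict Int Int × List Bool :=
  if h : toFill = [] then (true, dvs, placed, sf)
  else pvFillCols n (toFill.getLast h) toFill.dropLast (PySem.List.pyRange 0 n 1) dvs placed sf
termination_by (toFill.length, n.toNat + 1)
decreasing_by
  simp_wf
  have h1 : toFill.length - 1 + 1 = toFill.length := by
    have := List.length_pos_iff.mpr h; omega
  rw [h1]
  exact Prod.Lex.right _ (by omega)

def pvFillCols (n row : Int) (rest : List Int) (cols : List Int)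
    (dvs : PySem.Set (Int × Int)) (placed : PySem.Dict Int Int) (sf : List Bool) :
    Bool × PySem.Set (Int × Int) × PySem.Dict Int Int × List Bool :=
  match cols with
  | [] => (false, dvs, placed, sf)
  | col :: cols' =>
    if PySem.List.pyGetD sf col false then
      match pvPlaceRook row col dvs placed sf (some []) with
      | (true, dvs1, placed1, sf1, undo1) =>
        match pvFill n rest dvs1 placed1 sf1 with
        | (true, dvs2, placed2, sf2) => (true, dvs2, placed2, sf2)
        | (false, dvs2, placed2, sf2) =>
          pvFillCols n row rest cols' (pvDrain (undo1.getD []) dvs2)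
            (placed2.erase row) (PySem.List.pySetD sf2 col true)
      | (false, dvs1, placed1, sf1, undo1) =>
        pvFillCols n row rest cols' (pvDrain (undo1.getD []) dvs1) placed1 sf1
    else pvFillCols n row rest cols' dvs placed sf
termination_by (rest.length + 1, cols.length)
decreasing_by
  all_goals simp_wf
  all_goals first
    | exact Prod.Lex.left _ _ (by omega)
    | exact Prod.Lex.right _ (by omega)
end

def costas_array (rows : List (Option Int)) : Bool :=
  let n : Int := PySem.List.len rows
  let toFill : List Int :=
    ((PySem.List.enumerate rows).filter (fun p => p.2.isNone)).map (fun p => p.1)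
  let sf : List Bool := (PySem.List.pyRange 0 n 1).map (fun _ => true)
  match pvInitLoop (PySem.List.enumerate rows) (PySem.Set.empty, PySem.Dict.empty, sf) with
  | none => false
  | some (dvs, placed, sf') => (pvFill n toFill dvs placed sf').1

-- ===== PORT B =====

-- canon(dx, dy): fixed sign representative of {(dx, dy), (-dx, -dy)}
def pvCanon (dx dy : Int) : Int × Int :=
  if 0 < dx ∨ (dx = 0 ∧ 0 < dy) then (dx, dy) else (-dx, -dy)

-- the 'used' double loop of ok(): canonical vectors among the placed points
def pvUsedLoop : List (Int × Int) → List (Int × Int) → PySem.Set (Int × Int) →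
    PySem.Set (Int × Int)
  | [], _, used => used
  | p :: rest, done, used =>
    pvUsedLoop rest (done ++ [p])
      (done.foldl (fun u q => PySem.Set.add u (pvCanon (p.1 - q.1) (p.2 - q.2))) used)

-- the 'fresh' loop of ok()
def pvOkLoop (row col : Int) : List (Int × Int) → PySem.Set (Int × Int) →
    PySem.Set (Int × Int) → Bool
  | [], _, _ => true
  | (pr, pc) :: rest, used, fresh =>
    let v := pvCanon (row - pr) (col - pc)
    if v ∈ used ∨ v ∈ fresh then false
    else pvOkLoop row col rest used (PySem.Set.add fresh v)

-- ok(points, row, col)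
def pvOk (points : List (Int × Int)) (row col : Int) : Bool :=
  pvOkLoop row col points (pvUsedLoop points [] PySem.Set.empty) PySem.Set.empty

-- the fixed-rook loop of B; none = 'return False'
def pvInitB : List (Int × Option Int) → List (Int × Int) → List Bool →
    Option (List (Int × Int) × List Bool)
  | [], placed, free => some (placed, free)
  | (row, ocol) :: rest, placed, free =>
    match ocol with
    | none => pvInitB rest placed free
    | some col =>
      if pvOk placed row col then
        pvInitB rest (placed ++ [(row, col)]) (PySem.List.pySetD free col false)
      else none

-- solve(todo, placed, free)
mutual
def pvSolve (n : Int) (todo : List Int) (placed : List (Int × Int))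
    (free : List Bool) : Bool :=
  match todo with
  | [] => true
  | row :: rest => pvSolveCols n row rest (PySem.List.pyRange 0 n 1) placed free
termination_by (todo.length, n.toNat + 1)
decreasing_by
  simp_wf
  exact Prod.Lex.right _ (by omega)

def pvSolveCols (n row : Int) (rest : List Int) (cols : List Int)
    (placed : List (Int × Int)) (free : List Bool) : Bool :=
  match cols with
  | [] => false
  | col :: cols' =>
    if PySem.List.pyGetD free col false = true ∧ pvOk placed row col = true then
      -- free2 = list(free); free2[col] = False
      if pvSolve n rest (placed ++ [(row, col)]) (PySem.List.pySetD free col false) then true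
      else pvSolveCols n row rest cols' placed free
    else pvSolveCols n row rest cols' placed free
termination_by (rest.length + 1, cols.length)
decreasing_by
  all_goals simp_wf
  all_goals first
    | exact Prod.Lex.left _ _ (by omega)
    | exact Prod.Lex.right _ (by omega)
end

def costas_array_alt (rows : List (Option Int)) : Bool :=
  let n : Int := PySem.List.len rows
  match pvInitB (PySem.List.enumerate rows) []
      ((PySem.List.pyRange 0 n 1).map (fun _ => true)) with
  | none => false
  | some (placed, free) =>
    let todo : List Int :=
      (((PySem.List.enumerate rows).filter (fun p => p.2.isNone)).map (fun p => p.1)).reverse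
    pvSolve n todo placed free

-- ===== PRECONDITION & SPEC =====
-- Pre_: every fixed column is a valid Python index into the n-slot still_free list.
-- Outside it A raises IndexError on 'still_free[col] = False' (and B likewise on its own
-- free-table assignment) unless a difference-vector conflict already returned False first.
def Pre_costas_array (rows : List (Option Int)) : Prop :=
  ∀ c ∈ rows, ∀ v ∈ c, -PySem.List.len rows ≤ v ∧ v < PySem.List.len rows
instance (rows : List (Option Int)) : Decidable (Pre_costas_array rows) := by
  unfold Pre_costas_array; infer_instance
def pvWitness_costas_array : List (Option Int) := [some 0, none, some 1]

def Spec_costas_array (rows : List (Option Int)) (out : Bool) : Prop := out = costas_array_alt rows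
instance (rows : List (Option Int)) (out : Bool) : Decidable (Spec_costas_array rows out) := by
  unfold Spec_costas_array; infer_instance

-- ===== CLAIM (what is proved, stated in full; the proofs are below) =====
def Claim_equal_costas_array : Prop := ∀ (rows : List (Option Int)), Dom_costas_array rows → Pre_costas_array rows → Spec_costas_array rows (costas_array rows)

-- ===== LEMMAS AND PROOFS =====

lemma pvCanon_eq_iff (a b c d : Int) :
    pvCanon a b = pvCanon c d ↔ ((a, b) = (c, d) ∨ (a, b) = (-c, -d)) := by
  unfold pvCanon
  split_ifs <;> simp [Prod.ext_iff] <;> omega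

lemma pvUsedLoop_append (pts : List (Int × Int)) (p : Int × Int) :
    ∀ (done : List (Int × Int)) (used : PySem.Set (Int × Int)),
    pvUsedLoop (pts ++ [p]) done used =
      (done ++ pts).foldl (fun u q => PySem.Set.add u (pvCanon (p.1 - q.1) (p.2 - q.2)))
        (pvUsedLoop pts done used) := by
  induction pts with
  | nil => intro done used; simp [pvUsedLoop]
  | cons x pts ih =>
    intro done used
    simp only [List.cons_append, pvUsedLoop, ih, List.append_assoc, List.cons_append,
      List.nil_append]

lemma mem_pvUsedLoop_append (pts : List (Int × Int)) (p : Int × Int) (v : Int × Int) :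
    v ∈ pvUsedLoop (pts ++ [p]) [] PySem.Set.empty ↔
      v ∈ pvUsedLoop pts [] PySem.Set.empty ∨
        ∃ q ∈ pts, v = pvCanon (p.1 - q.1) (p.2 - q.2) := by
  rw [pvUsedLoop_append]
  simpa using PySem.Set.mem_foldl_add (l := pts) (f := fun q => pvCanon (p.1 - q.1) (p.2 - q.2))
    (s := pvUsedLoop pts [] PySem.Set.empty) (y := v)

lemma pvPlaceLoop_adds (row col : Int) :
    ∀ (pts : List (Int × Int)) (dvs : PySem.Set (Int × Int))
      (undo : Option (List (Int × Int))), dvs.Nodup →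
    ∃ Δ : List (Int × Int),
      (pvPlaceLoop row col pts dvs undo).2.1 = dvs ++ Δ ∧
      (pvPlaceLoop row col pts dvs undo).2.2 = undo.map (fun u => u ++ Δ) ∧
      (dvs ++ Δ).Nodup := by
  intro pts
  induction pts with
  | nil =>
    intro dvs undo hnd
    exact ⟨[], by simp [pvPlaceLoop], by cases undo <;> simp [pvPlaceLoop], by simpa⟩
  | cons q pts ih =>
    intro dvs undo hnd
    obtain ⟨pr, pc⟩ := q
    by_cases hc : ((row - pr, col - pc) ∈ dvs ∨ (pr - row, pc - col) ∈ dvs)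
    · refine ⟨[], ?_, ?_, by simpa⟩ <;> cases undo <;> simp [pvPlaceLoop, hc]
    · have hnotmem : (row - pr, col - pc) ∉ dvs := fun hm => hc (Or.inl hm)
      have hcond : ¬ ((row - pr, col - pc) ∈ dvs ∨ (-(row - pr), -(col - pc)) ∈ dvs) := by
        simpa using hc
      have hadd : PySem.Set.add dvs (row - pr, col - pc) = dvs ++ [(row - pr, col - pc)] :=
        PySem.Set.add_of_not_mem hnotmem
      have hnd' : (dvs ++ [(row - pr, col - pc)]).Nodup := by
        rw [List.nodup_append]
        refine ⟨hnd, List.nodup_singleton _, fun x hx y hy => ?_⟩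
        simp only [List.mem_singleton] at hy; subst hy
        exact fun e => hnotmem (e ▸ hx)
      obtain ⟨Δ', h1, h2, h3⟩ := ih (dvs ++ [(row - pr, col - pc)])
        (undo.map (fun u => u ++ [(row - pr, col - pc)])) hnd'
      refine ⟨(row - pr, col - pc) :: Δ', ?_, ?_, ?_⟩
      · simp only [pvPlaceLoop, if_neg hcond, hadd] at h1 ⊢
        simpa [List.append_assoc] using h1
      · simp only [pvPlaceLoop, if_neg hcond, hadd] at h2 ⊢
        rw [h2]
        cases undo <;> simp
      · simpa [List.append_assoc] using h3

lemma pvDrain_append (Δ : List (Int × Int)) :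
    ∀ dvs : PySem.Set (Int × Int), (dvs ++ Δ).Nodup → pvDrain Δ (dvs ++ Δ) = dvs := by
  induction Δ with
  | nil => intro dvs h; simp [pvDrain]
  | cons a Δ ih =>
    intro dvs h
    have hsplit : dvs ++ a :: Δ = (dvs ++ [a]) ++ Δ := by simp
    have h' : ((dvs ++ [a]) ++ Δ).Nodup := by rwa [← hsplit]
    have ha : a ∉ dvs := fun hm =>
      (List.nodup_append.mp h).2.2 a hm a (List.mem_cons_self) rfl
    unfold pvDrain at ih ⊢
    simp only [List.reverse_cons, List.foldl_append, List.foldl_cons, List.foldl_nil]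
    rw [hsplit, ih (dvs ++ [a]) h']
    have hmem : a ∈ dvs ++ [a] := by simp
    rw [pvSetRemove, PySem.Set.remove?_of_mem hmem]
    simp only [Option.getD_some, PySem.Set.discard, List.filter_append]
    have h1 : List.filter (fun y => !y == a) dvs = dvs :=
      List.filter_eq_self.mpr (fun p hp => by
        have : p ≠ a := fun e => ha (e ▸ hp)
        simpa using this)
    rw [h1]
    simp

lemma pvErase_insert (placed : PySem.Dict Int Int) (row col : Int)
    (h : placed.contains row = false) : (placed.insert row col).erase row = placed := by
  apply PySem.Dict.ext
  have hne : ∀ p ∈ placed.items, p.1 ≠ row := by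
    intro p hp hpr
    have : placed.contains row = true := by
      rw [PySem.Dict.contains_iff_mem_keys]
      simp only [PySem.Dict.keys]
      exact List.mem_map.mpr ⟨p, hp, hpr⟩
    simp [this] at h
  simp [PySem.Dict.erase, PySem.Dict.items_insert_of_not_contains _ _ h, List.filter_append,
    List.filter_eq_self]
  exact fun a b hm => hne (a, b) hm

lemma pvPlace_eq_ok (row col : Int) :
    ∀ (pts : List (Int × Int)) (dvs fresh used : PySem.Set (Int × Int))
      (undo : Option (List (Int × Int))),
    (∀ dx dy : Int, ((dx, dy) ∈ dvs ∨ (-dx, -dy) ∈ dvs) ↔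
        (pvCanon dx dy ∈ used ∨ pvCanon dx dy ∈ fresh)) →
    (pvPlaceLoop row col pts dvs undo).1 = pvOkLoop row col pts used fresh ∧
    ((pvPlaceLoop row col pts dvs undo).1 = true →
      ∀ dx dy : Int,
        ((dx, dy) ∈ (pvPlaceLoop row col pts dvs undo).2.1 ∨
         (-dx, -dy) ∈ (pvPlaceLoop row col pts dvs undo).2.1) ↔
        (pvCanon dx dy ∈ used ∨ pvCanon dx dy ∈ fresh ∨
          ∃ q ∈ pts, pvCanon dx dy = pvCanon (row - q.1) (col - q.2))) := by
  intro pts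
  induction pts with
  | nil =>
    intro dvs fresh used undo hrel
    refine ⟨rfl, fun _ dx dy => ?_⟩
    simpa using hrel dx dy
  | cons q rest ih =>
    intro dvs fresh used undo hrel
    obtain ⟨pr, pc⟩ := q
    have hcnd : ((row - pr, col - pc) ∈ dvs ∨ (-(row - pr), -(col - pc)) ∈ dvs) ↔
        (pvCanon (row - pr) (col - pc) ∈ used ∨ pvCanon (row - pr) (col - pc) ∈ fresh) :=
      hrel (row - pr) (col - pc)
    by_cases hA : ((row - pr, col - pc) ∈ dvs ∨ (-(row - pr), -(col - pc)) ∈ dvs)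
    · have hB : (pvCanon (row - pr) (col - pc) ∈ used ∨ pvCanon (row - pr) (col - pc) ∈ fresh) :=
        hcnd.mp hA
      constructor
      · simp only [pvPlaceLoop, pvOkLoop, if_pos hA, if_pos hB]
      · intro htrue
        exfalso
        simp only [pvPlaceLoop, if_pos hA] at htrue
        exact Bool.false_ne_true htrue
    · have hB : ¬ (pvCanon (row - pr) (col - pc) ∈ used ∨ pvCanon (row - pr) (col - pc) ∈ fresh) :=
        fun hb => hA (hcnd.mpr hb)
      have key : ∀ dx dy : Int,
          ((dx, dy) ∈ PySem.Set.add dvs (row - pr, col - pc) ∨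
           (-dx, -dy) ∈ PySem.Set.add dvs (row - pr, col - pc)) ↔
          (pvCanon dx dy ∈ used ∨
           pvCanon dx dy ∈ PySem.Set.add fresh (pvCanon (row - pr) (col - pc))) := by
        intro dx dy
        rw [PySem.Set.mem_add, PySem.Set.mem_add, PySem.Set.mem_add]
        have h1 := hrel dx dy
        have h2 : pvCanon dx dy = pvCanon (row - pr) (col - pc) ↔
            ((dx, dy) = (row - pr, col - pc) ∨ (dx, dy) = (-(row - pr), -(col - pc))) :=
          pvCanon_eq_iff _ _ _ _
        have h3 : ((-dx, -dy) = (row - pr, col - pc)) ↔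
            ((dx, dy) = (-(row - pr), -(col - pc))) := by
          simp only [Prod.ext_iff]; omega
        constructor
        · rintro ((h | h) | (h | h))
          · rcases h1.mp (Or.inl h) with h' | h'
            · exact Or.inl h'
            · exact Or.inr (Or.inl h')
          · exact Or.inr (Or.inr (h2.mpr (Or.inl h)))
          · rcases h1.mp (Or.inr h) with h' | h'
            · exact Or.inl h'
            · exact Or.inr (Or.inl h')
          · exact Or.inr (Or.inr (h2.mpr (Or.inr (h3.mp h))))
        · rintro (h | h | h)
          · rcases h1.mpr (Or.inl h) with h' | h'
            · exact Or.inl (Or.inl h')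
            · exact Or.inr (Or.inl h')
          · rcases h1.mpr (Or.inr h) with h' | h'
            · exact Or.inl (Or.inl h')
            · exact Or.inr (Or.inl h')
          · rcases h2.mp h with h' | h'
            · exact Or.inl (Or.inr h')
            · exact Or.inr (Or.inr (h3.mpr h'))
      have hrec := ih (PySem.Set.add dvs (row - pr, col - pc))
        (PySem.Set.add fresh (pvCanon (row - pr) (col - pc))) used
        (undo.map (fun u => u ++ [(row - pr, col - pc)])) key
      constructor
      · simp only [pvPlaceLoop, pvOkLoop, if_neg hA, if_neg hB]
        exact hrec.1
      · intro htrue dx dy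
        simp only [pvPlaceLoop, if_neg hA] at htrue ⊢
        rw [hrec.2 htrue dx dy]
        simp only [PySem.Set.mem_add, List.mem_cons]
        constructor
        · rintro (h | (h | h) | ⟨q, hq, h⟩)
          · exact Or.inl h
          · exact Or.inr (Or.inl h)
          · exact Or.inr (Or.inr ⟨(pr, pc), Or.inl rfl, h⟩)
          · exact Or.inr (Or.inr ⟨q, Or.inr hq, h⟩)
        · rintro (h | h | ⟨q, (rfl | hq), h⟩)
          · exact Or.inl h
          · exact Or.inr (Or.inl (Or.inl h))
          · exact Or.inr (Or.inl (Or.inr h))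
          · exact Or.inr (Or.inr ⟨q, hq, h⟩)

lemma pvFill_restore (n : Int) :
    ∀ (N : Nat) (t : List Int), t.length ≤ N →
    ∀ (dvs : PySem.Set (Int × Int)) (placed : PySem.Dict Int Int) (sf : List Bool),
      dvs.Nodup → sf.length = n.toNat →
      (∀ r ∈ t, placed.contains r = false) → t.Nodup →
      (pvFill n t dvs placed sf).1 = false →
      pvFill n t dvs placed sf = (false, dvs, placed, sf) := by
  intro N
  induction N with
  | zero =>
    intro t ht dvs placed sf _ _ _ _ hfalse
    have : t = [] := List.length_eq_zero_iff.mp (Nat.le_zero.mp ht)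
    subst this
    simp [pvFill] at hfalse
  | succ N ihN =>
    intro t ht dvs placed sf hnd hsf hfresh htnd hfalse
    by_cases h : t = []
    · subst h; simp [pvFill] at hfalse
    · set row := t.getLast h with hrow
      set rest := t.dropLast with hrest
      have htsplit : rest ++ [row] = t := List.dropLast_append_getLast h
      have hrestlen : rest.length ≤ N := by
        have := congrArg List.length htsplit
        simp at this; omega
      have hrowmem : row ∈ t := List.getLast_mem h
      have hrowfresh : placed.contains row = false := hfresh row hrowmem
      have hrestne : ∀ r ∈ rest, r ≠ row := by
        intro r hr
        have := htsplit ▸ htnd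
        exact (List.nodup_append.mp this).2.2 r hr row (List.mem_singleton.mpr rfl)
      have hrestfresh : ∀ r ∈ rest, placed.contains r = false := by
        intro r hr
        exact hfresh r (htsplit ▸ List.mem_append_left [row] hr)
      have hrestnd : rest.Nodup := by
        have := htsplit ▸ htnd
        exact (List.nodup_append.mp this).1
      -- the column loop restores state
      have hcolsmain : ∀ cols : List Int, (∀ c ∈ cols, 0 ≤ c ∧ c < n) →
          (pvFillCols n row rest cols dvs placed sf).1 = false →
          pvFillCols n row rest cols dvs placed sf = (false, dvs, placed, sf) := by
        intro cols
        induction cols with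
        | nil => intro _ _; simp [pvFillCols]
        | cons col cols' ihc =>
          intro hbnd hf
          have hcol := hbnd col (List.mem_cons_self)
          have hcoltn : col.toNat < sf.length := by omega
          by_cases g : PySem.List.pyGetD sf col false = true
          · obtain ⟨Δ, hΔ1, hΔ2, hΔ3⟩ :=
              pvPlaceLoop_adds row col placed.items dvs (some []) hnd
            rcases hres : pvPlaceLoop row col placed.items dvs (some []) with ⟨b, dvs', undo'⟩
            rw [hres] at hΔ1 hΔ2
            simp only at hΔ1 hΔ2
            subst hΔ1
            cases b with
            | false =>
              have hbody : pvFillCols n row rest (col :: cols') dvs placed sf =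
                  pvFillCols n row rest cols' (pvDrain ((undo').getD []) (dvs ++ Δ)) placed sf := by
                simp [pvFillCols, g, pvPlaceRook, hres]
              rw [hbody, hΔ2] at hf ⊢
              simp only [Option.map_some, List.nil_append, Option.getD_some] at hf ⊢
              rw [pvDrain_append Δ dvs hΔ3] at hf ⊢
              exact ihc (fun c hc => hbnd c (List.mem_cons_of_mem _ hc)) hf
            | true =>
              have hplaced1 : ∀ r ∈ rest, (placed.insert row col).contains r = false := by
                intro r hr
                rw [PySem.Dict.contains_insert]
                simp [hrestne r hr, hrestfresh r hr]
              have hsfset : PySem.List.pySetD sf col false = sf.set col.toNat false := by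
                rw [PySem.List.pySetD_of_nonneg _ _ hcol.1]
              have hsf1len : (PySem.List.pySetD sf col false).length = n.toNat := by
                rw [hsfset, List.length_set]; exact hsf
              rcases hF : pvFill n rest (dvs ++ Δ) (placed.insert row col)
                  (PySem.List.pySetD sf col false) with ⟨bF, dvsF, placedF, sfF⟩
              cases bF with
              | true =>
                exfalso
                have hbody : (pvFillCols n row rest (col :: cols') dvs placed sf).1 = true := by
                  simp [pvFillCols, g, pvPlaceRook, hres, hF]
                rw [hf] at hbody
                exact Bool.false_ne_true hbody
              | false =>
                have hrfill := ihN rest hrestlen (dvs ++ Δ) (placed.insert row col)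
                  (PySem.List.pySetD sf col false) hΔ3 hsf1len hplaced1 hrestnd (by rw [hF])
                rw [hF] at hrfill
                have hd : dvsF = dvs ++ Δ := by
                  have := congrArg (fun p => p.2.1) hrfill; simpa using this
                have hp : placedF = placed.insert row col := by
                  have := congrArg (fun p => p.2.2.1) hrfill; simpa using this
                have hs : sfF = PySem.List.pySetD sf col false := by
                  have := congrArg (fun p => p.2.2.2) hrfill; simpa using this
                have hgel : sf[col.toNat] = true := by
                  have hlt : col < PySem.List.len sf := by
                    rw [PySem.List.len_eq]; omega
                  have := PySem.List.pyGetD_eq_getElem (xs := sf) (i := col) (d := false)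
                    hcol.1 hlt
                  rw [this] at g; exact g
                have hsfrestore : PySem.List.pySetD sfF col true = sf := by
                  rw [hs, hsfset, PySem.List.pySetD_of_nonneg _ _ hcol.1]
                  have : (sf.set col.toNat false).set col.toNat true = sf.set col.toNat true :=
                    List.set_set ..
                  rw [this, ← hgel]
                  exact List.set_getElem_self hcoltn
                have hbody : pvFillCols n row rest (col :: cols') dvs placed sf =
                    pvFillCols n row rest cols' (pvDrain ((undo').getD []) dvsF)
                      (placedF.erase row) (PySem.List.pySetD sfF col true) := by
                  simp [pvFillCols, g, pvPlaceRook, hres, hF]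
                rw [hbody, hΔ2] at hf ⊢
                simp only [Option.map_some, List.nil_append, Option.getD_some] at hf ⊢
                rw [hd, pvDrain_append Δ dvs hΔ3, hp,
                  pvErase_insert placed row col hrowfresh, hsfrestore] at hf ⊢
                exact ihc (fun c hc => hbnd c (List.mem_cons_of_mem _ hc)) hf
          · have hbody : pvFillCols n row rest (col :: cols') dvs placed sf =
                pvFillCols n row rest cols' dvs placed sf := by
              simp [pvFillCols, g]
            rw [hbody] at hf ⊢
            exact ihc (fun c hc => hbnd c (List.mem_cons_of_mem _ hc)) hf
      have hbody : pvFill n t dvs placed sf =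
          pvFillCols n row rest (PySem.List.pyRange 0 n 1) dvs placed sf := by
        rw [pvFill]
        simp only [h, dite_false]
        rfl
      rw [hbody] at hfalse ⊢
      exact hcolsmain _ (fun c hc => by
        have := (PySem.List.mem_pyRange_one (a := 0) (b := n) (x := c)).mp hc
        exact ⟨this.1, this.2⟩) hfalse

def pvRel (n : Int) (dvs : PySem.Set (Int × Int)) (placed : PySem.Dict Int Int)
    (sf : List Bool) : Prop :=
  dvs.Nodup ∧ sf.length = n.toNat ∧
  (∀ dx dy : Int, ((dx, dy) ∈ dvs ∨ (-dx, -dy) ∈ dvs) ↔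
      pvCanon dx dy ∈ pvUsedLoop placed.items [] PySem.Set.empty)

lemma pvFill_eq_solve (n : Int) :
    ∀ (N : Nat) (s : List Int), s.length ≤ N →
    ∀ (dvs : PySem.Set (Int × Int)) (placed : PySem.Dict Int Int) (sf : List Bool),
      pvRel n dvs placed sf →
      (∀ r ∈ s, placed.contains r = false) → s.Nodup →
      (pvFill n s.reverse dvs placed sf).1 = pvSolve n s placed.items sf := by
  intro N
  induction N with
  | zero =>
    intro s hs dvs placed sf _ _ _
    have : s = [] := List.length_eq_zero_iff.mp (Nat.le_zero.mp hs)
    subst this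
    simp [pvFill, pvSolve]
  | succ N ihN =>
    intro s hs dvs placed sf hrel hfresh hsnd
    obtain ⟨hnd, hsf, hdv⟩ := hrel
    cases s with
    | nil => simp [pvFill, pvSolve]
    | cons row rest =>
      have hrevlen : rest.reverse.length = rest.length := List.length_reverse
      have hrestlen : rest.length ≤ N := by simp at hs; omega
      have hrowfresh : placed.contains row = false := hfresh row (List.mem_cons_self)
      have hrestne : ∀ r ∈ rest, r ≠ row := by
        intro r hr he
        exact (List.nodup_cons.mp hsnd).1 (he ▸ hr)
      have hrestfresh : ∀ r ∈ rest, placed.contains r = false :=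
        fun r hr => hfresh r (List.mem_cons_of_mem _ hr)
      have hrestnd : rest.Nodup := (List.nodup_cons.mp hsnd).2
      have hbodyA : pvFill n ((row :: rest).reverse) dvs placed sf =
          pvFillCols n row rest.reverse (PySem.List.pyRange 0 n 1) dvs placed sf := by
        rw [List.reverse_cons, pvFill,
          dif_neg (by simp : ¬(rest.reverse ++ [row] = []))]
        congr 1
        · exact List.getLast_concat
        · exact List.dropLast_concat
      have hbodyB : pvSolve n (row :: rest) placed.items sf =
          pvSolveCols n row rest (PySem.List.pyRange 0 n 1) placed.items sf := by
        simp [pvSolve]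
      rw [hbodyA, hbodyB]
      have main : ∀ cols : List Int, (∀ c ∈ cols, 0 ≤ c ∧ c < n) →
          (pvFillCols n row rest.reverse cols dvs placed sf).1 =
            pvSolveCols n row rest cols placed.items sf := by
        intro cols
        induction cols with
        | nil => intro _; simp [pvFillCols, pvSolveCols]
        | cons col cols' ihc =>
          intro hbnd
          have hcol := hbnd col (List.mem_cons_self)
          have hbnd' := fun c hc => hbnd c (List.mem_cons_of_mem _ hc)
          have hcoltn : col.toNat < sf.length := by omega
          by_cases g : PySem.List.pyGetD sf col false = true
          · -- node lemma
            have hrel0 : ∀ dx dy : Int, ((dx, dy) ∈ dvs ∨ (-dx, -dy) ∈ dvs) ↔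
                (pvCanon dx dy ∈ pvUsedLoop placed.items [] PySem.Set.empty ∨
                 pvCanon dx dy ∈ (PySem.Set.empty : PySem.Set (Int × Int))) := by
              intro dx dy
              simpa [PySem.Set.empty] using hdv dx dy
            have hnode := pvPlace_eq_ok row col placed.items dvs PySem.Set.empty
              (pvUsedLoop placed.items [] PySem.Set.empty) (some []) hrel0
            obtain ⟨Δ, hΔ1, hΔ2, hΔ3⟩ :=
              pvPlaceLoop_adds row col placed.items dvs (some []) hnd
            rcases hres : pvPlaceLoop row col placed.items dvs (some []) with ⟨b, dvs', undo'⟩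
            rw [hres] at hΔ1 hΔ2 hnode
            simp only at hΔ1 hΔ2
            subst hΔ1
            have hok : b = pvOk placed.items row col := hnode.1
            cases hb : b with
            | false =>
              have hokf : pvOk placed.items row col = false := by rw [← hok, hb]
              have hA : pvFillCols n row rest.reverse (col :: cols') dvs placed sf =
                  pvFillCols n row rest.reverse cols'
                    (pvDrain ((undo').getD []) (dvs ++ Δ)) placed sf := by
                simp [pvFillCols, g, pvPlaceRook, hres, hb]
              have hB : pvSolveCols n row rest (col :: cols') placed.items sf =
                  pvSolveCols n row rest cols' placed.items sf := by
                simp [pvSolveCols, hokf]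
              rw [hA, hB, hΔ2]
              simp only [Option.map_some, List.nil_append, Option.getD_some]
              rw [pvDrain_append Δ dvs hΔ3]
              exact ihc hbnd'
            | true =>
              subst hb
              have hokt : pvOk placed.items row col = true := hok.symm
              have hitems : (placed.insert row col).items = placed.items ++ [(row, col)] :=
                PySem.Dict.items_insert_of_not_contains _ _ hrowfresh
              have hplaced1 : ∀ r ∈ rest, (placed.insert row col).contains r = false := by
                intro r hr
                rw [PySem.Dict.contains_insert]
                simp [hrestne r hr, hrestfresh r hr]
              have hsfset : PySem.List.pySetD sf col false = sf.set col.toNat false := by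
                rw [PySem.List.pySetD_of_nonneg _ _ hcol.1]
              have hsf1len : (PySem.List.pySetD sf col false).length = n.toNat := by
                rw [hsfset, List.length_set]; exact hsf
              -- the new invariant
              have hrel1 : pvRel n (dvs ++ Δ) (placed.insert row col)
                  (PySem.List.pySetD sf col false) := by
                refine ⟨hΔ3, hsf1len, ?_⟩
                intro dx dy
                have h2 := hnode.2 rfl dx dy
                simp only at h2
                rw [h2, hitems]
                rw [mem_pvUsedLoop_append placed.items (row, col) (pvCanon dx dy)]
                constructor
                · rintro (h | h | h)
                  · exact Or.inl h
                  · exact absurd h (List.not_mem_nil)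
                  · exact Or.inr h
                · rintro (h | h)
                  · exact Or.inl h
                  · exact Or.inr (Or.inr h)
              have hIH := ihN rest hrestlen (dvs ++ Δ) (placed.insert row col)
                (PySem.List.pySetD sf col false) hrel1 hplaced1 hrestnd
              rw [hitems] at hIH
              rcases hF : pvFill n rest.reverse (dvs ++ Δ) (placed.insert row col)
                  (PySem.List.pySetD sf col false) with ⟨bF, dvsF, placedF, sfF⟩
              rw [hF] at hIH
              simp only at hIH
              cases bF with
              | true =>
                have hA : (pvFillCols n row rest.reverse (col :: cols') dvs placed sf).1 = true := by
                  simp [pvFillCols, g, pvPlaceRook, hres, hF]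
                have hB : pvSolveCols n row rest (col :: cols') placed.items sf = true := by
                  simp [pvSolveCols, hokt, g, ← hIH]
                rw [hA, hB]
              | false =>
                have hrfill := pvFill_restore n N rest.reverse (by omega) (dvs ++ Δ)
                  (placed.insert row col) (PySem.List.pySetD sf col false) hΔ3 hsf1len
                  (fun r hr => hplaced1 r (List.mem_reverse.mp hr))
                  (List.nodup_reverse.mpr hrestnd) (by rw [hF])
                rw [hF] at hrfill
                have hd : dvsF = dvs ++ Δ := by
                  have := congrArg (fun p => p.2.1) hrfill; simpa using this
                have hp : placedF = placed.insert row col := by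
                  have := congrArg (fun p => p.2.2.1) hrfill; simpa using this
                have hs2 : sfF = PySem.List.pySetD sf col false := by
                  have := congrArg (fun p => p.2.2.2) hrfill; simpa using this
                have hgel : sf[col.toNat] = true := by
                  have hlt : col < PySem.List.len sf := by
                    rw [PySem.List.len_eq]; omega
                  have := PySem.List.pyGetD_eq_getElem (xs := sf) (i := col) (d := false)
                    hcol.1 hlt
                  rw [this] at g; exact g
                have hsfrestore : PySem.List.pySetD sfF col true = sf := by
                  rw [hs2, hsfset, PySem.List.pySetD_of_nonneg _ _ hcol.1]
                  have : (sf.set col.toNat false).set col.toNat true = sf.set col.toNat true :=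
                    List.set_set ..
                  rw [this, ← hgel]
                  exact List.set_getElem_self hcoltn
                have hA : pvFillCols n row rest.reverse (col :: cols') dvs placed sf =
                    pvFillCols n row rest.reverse cols' (pvDrain ((undo').getD []) dvsF)
                      (placedF.erase row) (PySem.List.pySetD sfF col true) := by
                  simp [pvFillCols, g, pvPlaceRook, hres, hF]
                have hB : pvSolveCols n row rest (col :: cols') placed.items sf =
                    pvSolveCols n row rest cols' placed.items sf := by
                  simp [pvSolveCols, hokt, g, ← hIH]
                rw [hA, hB, hΔ2]
                simp only [Option.map_some, List.nil_append, Option.getD_some]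
                rw [hd, pvDrain_append Δ dvs hΔ3, hp,
                  pvErase_insert placed row col hrowfresh, hsfrestore]
                exact ihc hbnd'
          · have g' : PySem.List.pyGetD sf col false = false := by
              cases hgv : PySem.List.pyGetD sf col false with
              | false => rfl
              | true => exact absurd hgv g
            have hA : pvFillCols n row rest.reverse (col :: cols') dvs placed sf =
                pvFillCols n row rest.reverse cols' dvs placed sf := by
              simp [pvFillCols, g']
            have hB : pvSolveCols n row rest (col :: cols') placed.items sf =
                pvSolveCols n row rest cols' placed.items sf := by
              simp [pvSolveCols, g']
            rw [hA, hB]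
            exact ihc hbnd'
      exact main _ (fun c hc => by
        have := (PySem.List.mem_pyRange_one (a := 0) (b := n) (x := c)).mp hc
        exact ⟨this.1, this.2⟩)

lemma pvInit_eq (n : Int) :
    ∀ (entries : List (Int × Option Int)) (dvs : PySem.Set (Int × Int))
      (placed : PySem.Dict Int Int) (sf : List Bool),
      pvRel n dvs placed sf →
      (∀ p ∈ entries, placed.contains p.1 = false) →
      ((entries.map Prod.fst).Nodup) →
      (pvInitLoop entries (dvs, placed, sf) = none ∧
        pvInitB entries placed.items sf = none) ∨
      (∃ dvs' placed' sf',
        pvInitLoop entries (dvs, placed, sf) = some (dvs', placed', sf') ∧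
        pvInitB entries placed.items sf = some (placed'.items, sf') ∧
        pvRel n dvs' placed' sf' ∧
        (∀ r : Int, placed'.contains r = true ↔
          (placed.contains r = true ∨ ∃ c, (r, some c) ∈ entries))) := by
  intro entries
  induction entries with
  | nil =>
    intro dvs placed sf hrel _ _
    refine Or.inr ⟨dvs, placed, sf, rfl, rfl, hrel, fun r => ?_⟩
    simp
  | cons p rest ih =>
    intro dvs placed sf hrel hfresh hndfst
    obtain ⟨row, ocol⟩ := p
    obtain ⟨hnd, hsf, hdv⟩ := hrel
    cases ocol with
    | none =>
      have hA : pvInitLoop ((row, none) :: rest) (dvs, placed, sf) =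
          pvInitLoop rest (dvs, placed, sf) := by simp [pvInitLoop]
      have hB : pvInitB ((row, none) :: rest) placed.items sf =
          pvInitB rest placed.items sf := by simp [pvInitB]
      rw [hA, hB]
      have hndfst' : (row :: rest.map Prod.fst).Nodup := hndfst
      rcases ih dvs placed sf ⟨hnd, hsf, hdv⟩
        (fun q hq => hfresh q (List.mem_cons_of_mem _ hq))
        (List.nodup_cons.mp hndfst').2 with hcase | hcase
      · exact Or.inl hcase
      · obtain ⟨dvs', placed', sf', h1, h2, h3, h4⟩ := hcase
        refine Or.inr ⟨dvs', placed', sf', h1, h2, h3, fun r => ?_⟩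
        rw [h4 r]
        simp
    | some col =>
      have hrowfresh : placed.contains row = false := hfresh (row, some col) (List.mem_cons_self)
      have hrel0 : ∀ dx dy : Int, ((dx, dy) ∈ dvs ∨ (-dx, -dy) ∈ dvs) ↔
          (pvCanon dx dy ∈ pvUsedLoop placed.items [] PySem.Set.empty ∨
           pvCanon dx dy ∈ (PySem.Set.empty : PySem.Set (Int × Int))) := by
        intro dx dy
        simpa [PySem.Set.empty] using hdv dx dy
      have hnode := pvPlace_eq_ok row col placed.items dvs PySem.Set.empty
        (pvUsedLoop placed.items [] PySem.Set.empty) none hrel0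
      obtain ⟨Δ, hΔ1, hΔ2, hΔ3⟩ := pvPlaceLoop_adds row col placed.items dvs none hnd
      rcases hres : pvPlaceLoop row col placed.items dvs none with ⟨b, dvs', undo'⟩
      rw [hres] at hΔ1 hΔ2 hnode
      simp only at hΔ1 hΔ2
      subst hΔ1
      have hok : b = pvOk placed.items row col := hnode.1
      cases hb : b with
      | false =>
        have hokf : pvOk placed.items row col = false := by rw [← hok, hb]
        refine Or.inl ⟨?_, ?_⟩
        · simp [pvInitLoop, pvPlaceRook, hres, hb]
        · simp [pvInitB, hokf]
      | true =>
        subst hb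
        have hokt : pvOk placed.items row col = true := hok.symm
        have hitems : (placed.insert row col).items = placed.items ++ [(row, col)] :=
          PySem.Dict.items_insert_of_not_contains _ _ hrowfresh
        have hndfst' : (row :: rest.map Prod.fst).Nodup := hndfst
        have hrestne : ∀ q ∈ rest, q.1 ≠ row := by
          intro q hq he
          exact (List.nodup_cons.mp hndfst').1 (he ▸ List.mem_map_of_mem hq)
        have hfresh1 : ∀ q ∈ rest, (placed.insert row col).contains q.1 = false := by
          intro q hq
          rw [PySem.Dict.contains_insert]
          simp [hrestne q hq, hfresh q (List.mem_cons_of_mem _ hq)]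
        have hsf1len : (PySem.List.pySetD sf col false).length = n.toNat := by
          rw [PySem.List.length_pySetD]; exact hsf
        have hrel1 : pvRel n (dvs ++ Δ) (placed.insert row col)
            (PySem.List.pySetD sf col false) := by
          refine ⟨hΔ3, hsf1len, ?_⟩
          intro dx dy
          have h2 := hnode.2 rfl dx dy
          simp only at h2
          rw [h2, hitems]
          rw [mem_pvUsedLoop_append placed.items (row, col) (pvCanon dx dy)]
          constructor
          · rintro (h | h | h)
            · exact Or.inl h
            · exact absurd h (List.not_mem_nil)
            · exact Or.inr h
          · rintro (h | h)
            · exact Or.inl h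
            · exact Or.inr (Or.inr h)
        have hA : pvInitLoop ((row, some col) :: rest) (dvs, placed, sf) =
            pvInitLoop rest (dvs ++ Δ, placed.insert row col,
              PySem.List.pySetD sf col false) := by
          simp [pvInitLoop, pvPlaceRook, hres]
        have hB : pvInitB ((row, some col) :: rest) placed.items sf =
            pvInitB rest (placed.items ++ [(row, col)]) (PySem.List.pySetD sf col false) := by
          simp [pvInitB, hokt]
        rw [hA, hB, ← hitems]
        rcases ih (dvs ++ Δ) (placed.insert row col) (PySem.List.pySetD sf col false)
          hrel1 hfresh1 (List.nodup_cons.mp hndfst').2 with hcase | hcase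
        · exact Or.inl hcase
        · obtain ⟨dvs'', placed'', sf'', h1, h2, h3, h4⟩ := hcase
          refine Or.inr ⟨dvs'', placed'', sf'', h1, h2, h3, fun r => ?_⟩
          rw [h4 r, PySem.Dict.contains_insert]
          constructor
          · rintro (h | h)
            · rcases Bool.or_eq_true_iff.mp h with h' | h'
              · have hr : r = row := beq_iff_eq.mp h'
                exact Or.inr ⟨col, by rw [hr]; exact List.mem_cons_self⟩
              · exact Or.inl h'
            · obtain ⟨c, hc⟩ := h
              exact Or.inr ⟨c, List.mem_cons_of_mem _ hc⟩
          · rintro (h | ⟨c, hc⟩)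
            · exact Or.inl (by simp [h])
            · rcases List.mem_cons.mp hc with he | ht
              · have hr : r = row := by
                  have := congrArg Prod.fst he
                  simpa using this
                exact Or.inl (by simp [hr])
              · exact Or.inr ⟨c, ht⟩

-- ===== VERDICT (by name: the statement is the Claim_ definition above) =====
theorem costas_array_spec : Claim_equal_costas_array := by
  intro rows _ hpre
  unfold Spec_costas_array
  simp only [costas_array, costas_array_alt]
  have hsf0len : ((PySem.List.pyRange 0 (PySem.List.len rows) 1).map
      (fun _ => true)).length = (PySem.List.len rows).toNat := by
    rw [List.length_map, PySem.List.length_pyRange_one]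
    simp
  have hndEnum : ((PySem.List.enumerate rows).map Prod.fst).Nodup := by
    rw [PySem.List.map_fst_enumerate]
    exact PySem.List.nodup_pyRange_one _ _
  have hrel0 : pvRel (PySem.List.len rows) PySem.Set.empty PySem.Dict.empty
      ((PySem.List.pyRange 0 (PySem.List.len rows) 1).map (fun _ => true)) := by
    refine ⟨List.nodup_nil, hsf0len, ?_⟩
    intro dx dy
    constructor
    · rintro (h | h) <;> exact absurd h (List.not_mem_nil)
    · intro h
      exact absurd h (by simp [PySem.Dict.empty, pvUsedLoop, PySem.Set.empty])
  rcases pvInit_eq (PySem.List.len rows) (PySem.List.enumerate rows) PySem.Set.empty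
    PySem.Dict.empty ((PySem.List.pyRange 0 (PySem.List.len rows) 1).map (fun _ => true))
    hrel0 (fun p _ => PySem.Dict.contains_empty p.1) hndEnum with hcase | hcase
  · obtain ⟨h1, h2⟩ := hcase
    have h2' : pvInitB (PySem.List.enumerate rows) []
        ((PySem.List.pyRange 0 (PySem.List.len rows) 1).map (fun _ => true)) = none := h2
    rw [h1, h2']
  · obtain ⟨dvs', placed', sf', h1, h2, hrel', h4⟩ := hcase
    have h2' : pvInitB (PySem.List.enumerate rows) []
        ((PySem.List.pyRange 0 (PySem.List.len rows) 1).map (fun _ => true)) =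
        some (placed'.items, sf') := h2
    rw [h1, h2']
    simp only
    -- fixed rows are not pending
    have hfresh' : ∀ r ∈ (((PySem.List.enumerate rows).filter
        (fun p => p.2.isNone)).map (fun p => p.1)).reverse, placed'.contains r = false := by
      intro r hr
      rw [List.mem_reverse] at hr
      obtain ⟨p, hpf, hp1⟩ := List.mem_map.mp hr
      have hpe := List.mem_filter.mp hpf
      have hp2 : p.2 = none := Option.isNone_iff_eq_none.mp hpe.2
      have hrnone : (r, (none : Option Int)) ∈ PySem.List.enumerate rows := by
        have : p = (r, none) := by
          obtain ⟨a, b⟩ := p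
          simp only at hp1 hp2
          rw [hp1, hp2]
        exact this ▸ hpe.1
      cases hcont : placed'.contains r with
      | false => rfl
      | true =>
        exfalso
        rcases (h4 r).mp hcont with h | ⟨c, hc⟩
        · rw [PySem.Dict.contains_empty] at h
          exact Bool.false_ne_true h
        · obtain ⟨k, hk, hpk⟩ := (PySem.List.mem_enumerate_iff rows 0 _).mp hc
          obtain ⟨k', hk', hpk'⟩ := (PySem.List.mem_enumerate_iff rows 0 _).mp hrnone
          have hkk : (k : Int) = (k' : Int) := by
            have e1 : r = (k : Int) := by simpa using congrArg Prod.fst hpk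
            have e2 : r = (k' : Int) := by simpa using congrArg Prod.fst hpk'
            omega
          have : k = k' := by exact_mod_cast hkk
          subst this
          have e3 : some c = rows[k] := by simpa using congrArg Prod.snd hpk
          have e4 : (none : Option Int) = rows[k] := by simpa using congrArg Prod.snd hpk'
          rw [← e3] at e4
          exact absurd e4 (by simp)
    have hnd' : (((PySem.List.enumerate rows).filter
        (fun p => p.2.isNone)).map (fun p => p.1)).reverse.Nodup := by
      rw [List.nodup_reverse]
      refine List.Nodup.sublist (List.Sublist.map _ List.filter_sublist) ?_
      exact hndEnum
    have hmain := pvFill_eq_solve (PySem.List.len rows)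
      ((((PySem.List.enumerate rows).filter (fun p => p.2.isNone)).map
        (fun p => p.1)).reverse.length)
      ((((PySem.List.enumerate rows).filter (fun p => p.2.isNone)).map
        (fun p => p.1)).reverse) le_rfl dvs' placed' sf' hrel' hfresh' hnd'
    rw [List.reverse_reverse] at hmain
    exact hmain
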